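-- pv_equiv track=rewrite | github.com/MentalPandemic/Not-your-mom-s-OSINT | src/osint/__main__.py | _should_run_setup_bootstrap
-- ===== SOURCE A (Python) =====
-- def _should_run_setup_bootstrap(argv: list[str]) -> bool:
--     if any(arg in {"-h", "--help"} for arg in argv):
--         return False
--     if "--skip-setup" in argv:
--         return False
--
--     subcommand = next((arg for arg in argv[1:] if not arg.startswith("-")), None)
--     if subcommand in {"setup", "config"}:
--         return False
--
--     return True
-- ===== SOURCE B (Python) =====
-- def _should_run_setup_bootstrap(argv: list[str]) -> bool:
--     # Short-circuiting state machine: walk argv once with a unified blocker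
--     # set and a seeking-subcommand state, returning False at the first
--     # decisive token instead of re-scanning argv three times.
--     first = True
--     seeking = True
--     for arg in argv:
--         if arg in ("-h", "--help", "--skip-setup"):
--             return False
--         if not first and seeking and not arg.startswith("-"):
--             if arg in ("setup", "config"):
--                 return False
--             seeking = False
--         first = False
--     return True
-- ===== Notes on version B (the rewrite author's own statement) =====
-- stated objective: alternative
-- what changed: Replaces A's three independent scans (any() over a help set, a membership test, a generator over argv[1:]) with a short-circuiting state machine: one walk of argv against a unified blocker set with a seeking-subcommand flag that returns False at the first decisive token.
import Mathlib
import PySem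

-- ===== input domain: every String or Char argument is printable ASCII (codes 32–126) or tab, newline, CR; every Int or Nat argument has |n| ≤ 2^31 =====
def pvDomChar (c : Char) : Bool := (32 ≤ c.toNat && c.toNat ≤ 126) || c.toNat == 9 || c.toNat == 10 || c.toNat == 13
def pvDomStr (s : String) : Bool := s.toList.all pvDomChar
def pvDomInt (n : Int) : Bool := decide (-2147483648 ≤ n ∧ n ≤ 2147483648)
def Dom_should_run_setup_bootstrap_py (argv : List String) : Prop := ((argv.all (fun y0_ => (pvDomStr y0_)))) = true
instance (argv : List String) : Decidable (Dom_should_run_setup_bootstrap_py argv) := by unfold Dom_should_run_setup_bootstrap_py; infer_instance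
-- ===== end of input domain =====

-- B replaces A's three independent scans with a short-circuiting one-walk state machine
-- over a unified blocker set (alternative decomposition, same cost).

-- ===== PORT A =====
-- shared helper: Python's arg.startswith("-")
def pvDash (a : String) : Bool := PySem.Str.startswith a "-"

def should_run_setup_bootstrap_py (argv : List String) : Bool :=
  if argv.any (fun arg => arg == "-h" || arg == "--help") then false
  else if argv.contains "--skip-setup" then false
  else
    let subcommand : Option String :=
      (PySem.List.slice argv (some 1) none).find? (fun arg => !(pvDash arg))
    if subcommand == some "setup" || subcommand == some "config" then false
    else true

-- ===== PORT B =====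
-- B's for-loop with early returns, transliterated as structural recursion
-- carrying the loop state (first, seeking); 'return False' = value false.
def pvLoopB : List String → Bool → Bool → Bool
  | [], _, _ => true
  | arg :: rest, first, seeking =>
      if arg == "-h" || arg == "--help" || arg == "--skip-setup" then false
      else if !first && seeking && !(pvDash arg) then
        if arg == "setup" || arg == "config" then false
        else pvLoopB rest false false
      else pvLoopB rest false seeking

def should_run_setup_bootstrap_py_alt (argv : List String) : Bool :=
  pvLoopB argv true true

-- ===== PRECONDITION & SPEC =====
def Spec_should_run_setup_bootstrap_py (argv : List String) (out : Bool) : Prop := out = should_run_setup_bootstrap_py_alt argv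
instance (argv : List String) (out : Bool) : Decidable (Spec_should_run_setup_bootstrap_py argv out) := by unfold Spec_should_run_setup_bootstrap_py; infer_instance

-- ===== CLAIM (what is proved, stated in full; the proofs are below) =====
def Claim_equal_should_run_setup_bootstrap_py : Prop := ∀ (argv : List String), Dom_should_run_setup_bootstrap_py argv → Spec_should_run_setup_bootstrap_py argv (should_run_setup_bootstrap_py argv)

-- ===== LEMMAS AND PROOFS =====

def pvBlock (a : String) : Bool := a == "-h" || a == "--help" || a == "--skip-setup"

-- After the subcommand slot is settled (seeking = false), the loop is a scan for blockers.
theorem pvLoopB_done (xs : List String) :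
    pvLoopB xs false false = !(xs.any pvBlock) := by
  induction xs with
  | nil => rfl
  | cons a t ih =>
      cases hb : (a == "-h" || a == "--help" || a == "--skip-setup") with
      | true =>
          have hB : pvBlock a = true := hb
          simp [pvLoopB, hb, hB]
      | false =>
          have hB : pvBlock a = false := hb
          simp [pvLoopB, hb, hB, ih]

-- While still seeking (past the program name): no blocker anywhere AND the first
-- non-dash token is not 'setup'/'config'.
theorem pvLoopB_seek (xs : List String) :
    pvLoopB xs false true =
      (!(xs.any pvBlock) &&
        (match xs.find? (fun a => !(pvDash a)) with
         | some v => !(v == "setup" || v == "config")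
         | none => true)) := by
  induction xs with
  | nil => rfl
  | cons a t ih =>
      cases hb : (a == "-h" || a == "--help" || a == "--skip-setup") with
      | true =>
          have hB : pvBlock a = true := hb
          simp [pvLoopB, hb, hB]
      | false =>
          have hB : pvBlock a = false := hb
          cases hd : pvDash a with
          | true =>
              rw [List.find?_cons_of_neg (by simp [hd])]
              simp [pvLoopB, hb, hB, hd, ih]
          | false =>
              rw [List.find?_cons_of_pos (by simp [hd])]
              cases hsc : (a == "setup" || a == "config") with
              | true => simp [pvLoopB, hb, hB, hd, hsc]
              | false => simp [pvLoopB, hb, hB, hd, hsc, pvLoopB_done]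

theorem pv_beq_comm (x y : String) : (x == y) = (y == x) := by
  by_cases h : x = y
  · subst h; rfl
  · rw [beq_eq_false_iff_ne.mpr h, beq_eq_false_iff_ne.mpr (Ne.symm h)]

theorem pv_any_block (t : List String) :
    t.any pvBlock
      = (t.any (fun a => a == "-h" || a == "--help") || t.contains "--skip-setup") := by
  induction t with
  | nil => rfl
  | cons a t ih =>
      simp only [List.any_cons, List.contains_cons, pvBlock, ih, pv_beq_comm "--skip-setup" a]
      cases (a == "-h") <;> cases (a == "--help") <;> cases (a == "--skip-setup") <;>
        cases t.any (fun a => a == "-h" || a == "--help") <;> cases t.contains "--skip-setup" <;> rfl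

theorem pv_subOK (F : Option String) :
    (match F with
     | some v => !(v == "setup" || v == "config")
     | none => true) = !(F == some "setup" || F == some "config") := by
  cases F with
  | none => rfl
  | some v => simp

-- the pure boolean shape of the equivalence: A's three sequential ifs vs
-- B's head-blocker check followed by the seek characterisation
theorem pv_key (x y u v w : Bool) :
    (if x || u then false else if y || v then false else if w then false else true)
      = (if x || y then false else (!(u || v) && !w)) := by
  cases x <;> cases y <;> cases u <;> cases v <;> cases w <;> rfl

theorem should_run_setup_bootstrap_agree (argv : List String) :
    should_run_setup_bootstrap_py argv = should_run_setup_bootstrap_py_alt argv := by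
  cases argv with
  | nil => rfl
  | cons a t =>
      show (if (a :: t).any (fun arg => arg == "-h" || arg == "--help") then false
            else if (a :: t).contains "--skip-setup" then false
            else if (PySem.List.slice (a :: t) (some 1) none).find? (fun arg => !(pvDash arg)) == some "setup" ||
                    (PySem.List.slice (a :: t) (some 1) none).find? (fun arg => !(pvDash arg)) == some "config" then false
            else true)
          = (if a == "-h" || a == "--help" || a == "--skip-setup" then false
             else pvLoopB t false true)
      rw [pvLoopB_seek, pv_any_block, pv_subOK, PySem.List.slice_from_one, List.tail_cons,
          List.any_cons, List.contains_cons, pv_beq_comm "--skip-setup" a, pv_key,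
          Bool.or_assoc]

-- ===== VERDICT (by name: the statement is the Claim_ definition above) =====
theorem should_run_setup_bootstrap_py_spec : Claim_equal_should_run_setup_bootstrap_py := by
  intro argv _
  unfold Spec_should_run_setup_bootstrap_py
  exact should_run_setup_bootstrap_agree argv
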